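-- pv_equiv track=rewrite | github.com/identicurse/IdentiCurse | src/identicurse/helpers.py | find_fuzzy_matches
-- ===== SOURCE A (Python) =====
-- def find_fuzzy_matches(fragment, words):
--     if len(fragment) == 0:
--         return []
--     matches = []
--     for word in words:
--         fragment_index = 0
--         for char in word:
--             if char == fragment[fragment_index]:
--                 fragment_index += 1
--             if fragment_index == len(fragment):  # all chars existed in order, this is a fuzzy match
--                 matches.append(word)
--                 break
--     return matches
-- ===== SOURCE B (Python) =====
-- def find_fuzzy_matches(fragment, words):
--     if len(fragment) == 0:
--         return []
--     matches = []
--     for word in words: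
--         # inverted index: character -> ascending list of its positions in word
--         positions = {}
--         i = 0
--         for ch in word:
--             positions.setdefault(ch, []).append(i)
--             i += 1
--         # walk the fragment, jumping through the position lists
--         lo = 0
--         for c in fragment:
--             lo = next((p + 1 for p in positions.get(c, []) if p >= lo), None)
--             if lo is None:
--                 break
--         else:
--             matches.append(word)
--     return matches
-- ===== Notes on version B (the rewrite author's own statement) =====
-- stated objective: alternative
-- what changed: Instead of A's single greedy scan of each word with a fragment-index counter, B first builds an inverted index (dict mapping each character to the ascending list of its positions in the word) and then walks the fragment, for each fragment character jumping to the first recorded position at or past the current cursor.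
import Mathlib
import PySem

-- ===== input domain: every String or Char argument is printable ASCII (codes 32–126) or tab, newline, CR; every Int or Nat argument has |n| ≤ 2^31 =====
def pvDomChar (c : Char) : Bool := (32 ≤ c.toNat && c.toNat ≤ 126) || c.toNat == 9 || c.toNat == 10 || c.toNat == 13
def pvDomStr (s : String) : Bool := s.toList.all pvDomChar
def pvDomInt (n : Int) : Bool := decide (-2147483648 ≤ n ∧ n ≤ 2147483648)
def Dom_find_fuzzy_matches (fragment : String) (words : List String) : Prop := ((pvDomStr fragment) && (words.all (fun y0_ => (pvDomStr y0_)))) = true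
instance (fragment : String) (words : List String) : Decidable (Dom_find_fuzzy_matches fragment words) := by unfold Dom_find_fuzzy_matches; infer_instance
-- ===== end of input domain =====

-- B replaces A's per-word greedy scan with a fragment-index counter by an inverted
-- index (char -> ascending position list per word) walked with a cursor; objective: alternative.

-- ===== PORT A =====
-- inner 'for char in word' loop of A: fragment_index counter, break-on-complete (true = word appended)
def fuzzyScanA (frag : List Char) : List Char → Nat → Bool
  | [], _ => false
  | ch :: rest, fi =>
    let fi' := if frag[fi]? = some ch then fi + 1 else fi
    if fi' = frag.length then true else fuzzyScanA frag rest fi'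

def find_fuzzy_matches (fragment : String) (words : List String) : List String :=
  if fragment.toList.length = 0 then []
  else
    words.foldl (fun acc word =>
      if fuzzyScanA fragment.toList word.toList 0 then acc ++ [word] else acc) []

-- ===== PORT B =====
-- 'positions.setdefault(ch, []).append(i)' loop with the explicit counter i
def buildPos : List Char → Nat → PySem.Dict Char (List Nat) → PySem.Dict Char (List Nat)
  | [], _, d => d
  | ch :: rest, i, d => buildPos rest (i + 1) (d.modify ch [] (· ++ [i]))

-- 'next((p + 1 for p in idxs if p >= lo), None)'
def firstGE : List Nat → Nat → Option Nat
  | [], _ => none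
  | p :: rest, lo => if lo ≤ p then some (p + 1) else firstGE rest lo

-- 'for c in fragment: … else: append' loop over the fragment with cursor lo
def walkB (d : PySem.Dict Char (List Nat)) : List Char → Nat → Bool
  | [], _ => true
  | c :: fs, lo =>
    match firstGE (d.getD c []) lo with
    | none => false
    | some lo' => walkB d fs lo'

def find_fuzzy_matches_alt (fragment : String) (words : List String) : List String :=
  if fragment.toList.length = 0 then []
  else
    words.filter (fun word =>
      walkB (buildPos word.toList 0 PySem.Dict.empty) fragment.toList 0)

-- ===== PRECONDITION & SPEC =====
def Spec_find_fuzzy_matches (fragment : String) (words : List String) (out : List String) : Prop := out = find_fuzzy_matches_alt fragment words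
instance (fragment : String) (words : List String) (out : List String) : Decidable (Spec_find_fuzzy_matches fragment words out) := by unfold Spec_find_fuzzy_matches; infer_instance

-- ===== CLAIM (what is proved, stated in full; the proofs are below) =====
def Claim_equal_find_fuzzy_matches : Prop := ∀ (fragment : String) (words : List String), Dom_find_fuzzy_matches fragment words → Spec_find_fuzzy_matches fragment words (find_fuzzy_matches fragment words)

-- ===== LEMMAS AND PROOFS =====

-- Reference greedy subsequence consumer, the meeting point of the two proofs.
def greedy : List Char → List Char → Bool
  | [], _ => true
  | _ :: _, [] => false
  | c :: fs, w :: ws => if w = c then greedy fs ws else greedy (c :: fs) ws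

-- Ascending positions of c in w, indices starting at i.
def posFrom : List Char → Nat → Char → List Nat
  | [], _, _ => []
  | x :: xs, i, c => (if x = c then [i] else []) ++ posFrom xs (i + 1) c

-- Index of first occurrence of c.
def findC : List Char → Char → Option Nat
  | [], _ => none
  | x :: xs, c => if x = c then some 0 else (findC xs c).map (· + 1)

-- ---- A side ----
theorem fuzzyScanA_eq_greedy (frag : List Char) (word : List Char) :
    ∀ fi, fi < frag.length → fuzzyScanA frag word fi = greedy (frag.drop fi) word := by
  induction word with
  | nil =>
    intro fi hfi
    have : ∃ c fs, frag.drop fi = c :: fs := by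
      cases h : frag.drop fi with
      | nil => have := List.drop_eq_nil_iff.mp h; omega
      | cons c fs => exact ⟨c, fs, rfl⟩
    obtain ⟨c, fs, h⟩ := this
    simp [fuzzyScanA, h, greedy]
  | cons ch rest ih =>
    intro fi hfi
    have hget : frag[fi]? = some frag[fi] := List.getElem?_eq_getElem hfi
    have hdrop : frag.drop fi = frag[fi] :: frag.drop (fi + 1) :=
      List.drop_eq_getElem_cons hfi
    by_cases heq : frag[fi] = ch
    · by_cases hlast : fi + 1 = frag.length
      · have hnil : frag.drop (fi + 1) = [] := by
          rw [List.drop_eq_nil_iff]; omega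
        simp [fuzzyScanA, hget, heq, hlast, hdrop, greedy]
      · have hlt : fi + 1 < frag.length := by omega
        simp [fuzzyScanA, hget, heq, hlast, hdrop, greedy, ih (fi + 1) hlt]
    · have hne : frag[fi]? ≠ some ch := by simp [hget, heq]
      have hno : fi ≠ frag.length := by omega
      simp only [fuzzyScanA, if_neg hne, if_neg hno, hdrop, greedy]
      rw [if_neg (fun h => heq h.symm), ih fi hfi, hdrop]

theorem foldl_append_filter (p : String → Bool) (l : List String) :
    ∀ acc, l.foldl (fun acc word => if p word then acc ++ [word] else acc) acc
      = acc ++ l.filter p := by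
  induction l with
  | nil => intro acc; simp
  | cons w l ih =>
    intro acc
    by_cases h : p w <;> simp [List.foldl_cons, h, ih]

-- ---- B side ----
theorem build_getD (w : List Char) :
    ∀ (i : Nat) (d : PySem.Dict Char (List Nat)) (c : Char),
      (buildPos w i d).getD c [] = d.getD c [] ++ posFrom w i c := by
  induction w with
  | nil => intro i d c; simp [buildPos, posFrom]
  | cons x xs ih =>
    intro i d c
    rw [buildPos, ih, PySem.Dict.getD_modify]
    by_cases h : c = x
    · subst h; simp [posFrom]
    · simp [posFrom, h, Ne.symm h]

theorem posFrom_ge (w : List Char) :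
    ∀ (i : Nat) (c : Char) (x : Nat), x ∈ posFrom w i c → i ≤ x := by
  induction w with
  | nil => intro i c x hx; simp [posFrom] at hx
  | cons y ys ih =>
    intro i c x hx
    rcases List.mem_append.mp hx with h | h
    · split at h <;> simp at h; omega
    · have := ih (i + 1) c x h; omega

theorem firstGE_shift (l : List Nat) (lo a : Nat) (hla : lo ≤ a)
    (h : ∀ x ∈ l, a ≤ x) : firstGE l lo = firstGE l a := by
  cases l with
  | nil => rfl
  | cons p rest =>
    have hp : a ≤ p := h p (by simp)
    simp [firstGE, Nat.le_trans hla hp, hp]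

theorem firstGE_posFrom (w : List Char) :
    ∀ (i lo : Nat) (c : Char), i ≤ lo →
      firstGE (posFrom w i c) lo
        = (findC (w.drop (lo - i)) c).map (fun k => lo + k + 1) := by
  induction w with
  | nil => intro i lo c _; simp [posFrom, firstGE, findC]
  | cons x xs ih =>
    intro i lo c hil
    by_cases hlo : lo = i
    · subst hlo
      have hz : lo - lo = 0 := by omega
      rw [hz, List.drop_zero]
      by_cases h : x = c
      · simp [posFrom, h, firstGE, findC]
      · have hge : ∀ y ∈ posFrom xs (lo + 1) c, lo + 1 ≤ y :=
          fun y hy => posFrom_ge xs (lo + 1) c y hy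
        rw [posFrom, if_neg h, List.nil_append,
          firstGE_shift _ lo (lo + 1) (by omega) hge,
          ih (lo + 1) (lo + 1) c (le_refl _)]
        simp [findC, h, Option.map_map]
        cases findC xs c <;> simp [Function.comp]; omega
    · have hlt : i < lo := by omega
      have hd : (x :: xs).drop (lo - i) = xs.drop (lo - (i + 1)) := by
        have h1 : lo - i = (lo - (i + 1)) + 1 := by omega
        rw [h1, List.drop_succ_cons]
      rw [hd]
      have hrec := ih (i + 1) lo c (by omega)
      by_cases h : x = c
      · rw [posFrom, if_pos h]
        simp only [List.singleton_append, firstGE, if_neg (by omega : ¬ lo ≤ i)]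
        exact hrec
      · rw [posFrom, if_neg h, List.nil_append]
        exact hrec

theorem greedy_step (c : Char) (fs : List Char) (u : List Char) :
    greedy (c :: fs) u
      = match findC u c with
        | none => false
        | some k => greedy fs (u.drop (k + 1)) := by
  induction u with
  | nil => simp [greedy, findC]
  | cons x xs ih =>
    by_cases h : x = c
    · simp [greedy, findC, h]
    · rw [greedy, if_neg h, ih, findC, if_neg h]
      cases findC xs c <;> simp

theorem walkB_eq_greedy (w : List Char) (frag : List Char) :
    ∀ lo, walkB (buildPos w 0 PySem.Dict.empty) frag lo = greedy frag (w.drop lo) := by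
  induction frag with
  | nil => intro lo; simp [walkB, greedy]
  | cons c fs ih =>
    intro lo
    rw [walkB, build_getD, PySem.Dict.getD_empty, List.nil_append,
      firstGE_posFrom w 0 lo c (Nat.zero_le _), greedy_step]
    have hz : lo - 0 = lo := by omega
    rw [hz]
    cases hfc : findC (w.drop lo) c with
    | none => rfl
    | some k =>
      simp only [Option.map_some]
      rw [ih (lo + k + 1)]
      have : (w.drop lo).drop (k + 1) = w.drop (lo + k + 1) := by
        rw [List.drop_drop]; ring_nf
      rw [this]

-- ===== VERDICT (by name: the statement is the Claim_ definition above) =====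
theorem find_fuzzy_matches_spec : Claim_equal_find_fuzzy_matches := by
  intro fragment words _
  unfold Spec_find_fuzzy_matches find_fuzzy_matches find_fuzzy_matches_alt
  by_cases h : fragment.toList.length = 0
  · simp [h]
  · have hne : 0 < fragment.toList.length := Nat.pos_of_ne_zero h
    simp only [if_neg h]
    rw [foldl_append_filter]
    simp only [List.nil_append]
    congr 1
    funext word
    rw [walkB_eq_greedy word.toList fragment.toList 0, List.drop_zero]
    simpa using fuzzyScanA_eq_greedy fragment.toList word.toList 0 hne
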